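-- pv_equiv track=rewrite | github.com/kbudaj/university | Python/cw11/zad3.py | burp
-- ===== SOURCE A (Python) =====
-- def burp(word):
--     ltrs = {}
--     line = []
--
--     for letter in word:
--         if letter not in ltrs:
--             ltrs[letter] = len(ltrs) + 1
--         line.append(str(ltrs[letter]))
--     return "-".join(line)
-- ===== SOURCE B (Python) =====
-- def burp(word):
--     # Each letter's number is the count of distinct letters in the prefix of
--     # the word up to (and including) that letter's first occurrence: no
--     # mapping structure is built or maintained.
--     return "-".join(str(len(set(word[:word.index(c) + 1]))) for c in word)
-- ===== Notes on version B (the rewrite author's own statement) =====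
-- stated objective: alternative
-- what changed: B builds and maintains no letter-to-number mapping at all: for each letter it computes the number directly as the count of distinct letters in the prefix of the word ending at that letter's first occurrence (len(set(word[:word.index(c)+1]))), instead of A's incrementally grown dict of first-occurrence ranks.
import Mathlib
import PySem

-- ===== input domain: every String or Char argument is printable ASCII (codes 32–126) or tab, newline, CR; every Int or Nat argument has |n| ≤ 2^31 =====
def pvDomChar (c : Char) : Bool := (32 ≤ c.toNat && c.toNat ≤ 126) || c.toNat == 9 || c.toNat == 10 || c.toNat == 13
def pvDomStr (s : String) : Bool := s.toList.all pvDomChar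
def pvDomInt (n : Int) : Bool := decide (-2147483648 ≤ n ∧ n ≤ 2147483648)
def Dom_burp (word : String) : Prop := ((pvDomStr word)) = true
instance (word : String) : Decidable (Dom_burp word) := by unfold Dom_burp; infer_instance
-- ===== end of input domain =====

-- B builds no mapping at all: each letter's number is the count of distinct letters in the
-- prefix up to that letter's first occurrence (objective: alternative; not faster).

-- ===== PORT A =====
-- one loop iteration of A: maybe-extend the dict, append str(ltrs[letter])
def burpStep (st : PySem.Dict Char Int × List String) (letter : Char) :
    PySem.Dict Char Int × List String :=
  let ltrs := if st.1.contains letter then st.1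
              else st.1.insert letter ((st.1.size : Int) + 1)
  (ltrs, st.2 ++ [PySem.Int.toStr (ltrs.getD letter 0)])  -- getD's default unreachable: key just ensured present

def burp (word : String) : String :=
  PySem.Str.join "-" (word.toList.foldl burpStep (PySem.Dict.empty, [])).2

-- ===== PORT B =====
def burp_alt (word : String) : String :=
  PySem.Str.join "-"
    (word.toList.map (fun c =>
      -- word.index(c) never raises (c comes from word), so index?'s default 0 is unreachable;
      -- word[: idx+1] with idx+1 ≥ 0 is PySem.List.slice with upper bound idx+1
      let idx : Int := ((PySem.List.index? word.toList c).getD 0 : Nat)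
      PySem.Int.toStr
        (((PySem.Set.ofList (PySem.List.slice word.toList none (some (idx + 1)))).length : Int))))

-- ===== PRECONDITION & SPEC =====
def Spec_burp (word : String) (out : String) : Prop := out = burp_alt word
instance (word : String) (out : String) : Decidable (Spec_burp word out) := by unfold Spec_burp; infer_instance

-- ===== CLAIM (what is proved, stated in full; the proofs are below) =====
def Claim_equal_burp : Prop := ∀ (word : String), Dom_burp word → Spec_burp word (burp word)

-- ===== LEMMAS AND PROOFS =====

theorem dedup_append_singleton (p : List Char) (c : Char) :
    PySem.List.dedup (p ++ [c]) = PySem.Set.add (PySem.List.dedup p) c := by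
  simp only [PySem.List.dedup_eq_ofList, PySem.Set.ofList_eq_foldl, List.foldl_append,
    List.foldl_cons, List.foldl_nil]

theorem dedup_append_exists (ys xs : List Char) :
    ∃ t, PySem.List.dedup (xs ++ ys) = PySem.List.dedup xs ++ t := by
  induction ys generalizing xs with
  | nil => exact ⟨[], by simp⟩
  | cons y ys ih =>
    have h : xs ++ y :: ys = (xs ++ [y]) ++ ys := by simp
    rw [h]
    obtain ⟨t, ht⟩ := ih (xs ++ [y])
    rw [ht, dedup_append_singleton]
    unfold PySem.Set.add
    split
    · exact ⟨t, rfl⟩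
    · exact ⟨[y] ++ t, by simp⟩

theorem index?_append_singleton_of_ne (l : List Char) (x c : Char) (h : x ≠ c) :
    PySem.List.index? (l ++ [c]) x = PySem.List.index? l x := by
  induction l with
  | nil =>
    rw [List.nil_append, PySem.List.index?_cons_of_ne _ (Ne.symm h)]
    simp [PySem.List.index?_eq_idxOf?]
  | cons a l ih =>
    by_cases hax : a = x
    · subst hax
      rw [List.cons_append, PySem.List.index?_cons_self, PySem.List.index?_cons_self]
    · rw [List.cons_append, PySem.List.index?_cons_of_ne _ hax,
        PySem.List.index?_cons_of_ne _ hax, ih]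

-- the invariant-carrying loop lemma: A's fold over `rest` after prefix `p` appends the entries
-- numbered by the position of each letter in the deduplicated full word
theorem burp_loop (rest : List Char) :
    ∀ (p : List Char) (d : PySem.Dict Char Int) (line : List String),
    (∀ x, d.get? x = Option.map (fun (i : Nat) => ((i : Int) + 1))
        (PySem.List.index? (PySem.List.dedup p) x)) →
    d.size = (PySem.List.dedup p).length →
    (rest.foldl burpStep (d, line)).2 =
      line ++ rest.map (fun c =>
        PySem.Int.toStr (((PySem.List.index? (PySem.List.dedup (p ++ rest)) c).getD 0 : Int) + 1)) := by
  induction rest with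
  | nil => intro p d line _ _; simp
  | cons c rest ih =>
    intro p d line hget hsize
    have hcontains : d.contains c = ((PySem.List.index? (PySem.List.dedup p) c).isSome) := by
      rw [PySem.Dict.contains_eq_isSome_get?, hget, Option.isSome_map]
    have hpc : p ++ c :: rest = (p ++ [c]) ++ rest := by simp
    by_cases hc : c ∈ PySem.List.dedup p
    · -- letter already seen: dict unchanged, dedup unchanged
      have hcp : c ∈ p := (PySem.List.mem_dedup p c).mp hc
      have hidx : (PySem.List.index? (PySem.List.dedup p) c).isSome := by
        rw [PySem.List.index?_isSome_iff]; exact hc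
      have hcon : d.contains c = true := by rw [hcontains, hidx]
      have hded : PySem.List.dedup (p ++ [c]) = PySem.List.dedup p := by
        rw [dedup_append_singleton]
        unfold PySem.Set.add
        simp [PySem.Set.contains, hcp]
      obtain ⟨i, hi⟩ := Option.isSome_iff_exists.mp hidx
      have hstable : PySem.List.index? (PySem.List.dedup (p ++ c :: rest)) c = some i := by
        rw [hpc]
        obtain ⟨t, ht⟩ := dedup_append_exists rest (p ++ [c])
        rw [ht, hded, PySem.List.index?_append_of_mem _ hc, hi]
      have hstep : burpStep (d, line) c =
          (d, line ++ [PySem.Int.toStr ((i : Int) + 1)]) := by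
        unfold burpStep
        simp only [hcon, if_true]
        have : d.getD c 0 = (i : Int) + 1 := by
          rw [PySem.Dict.getD_eq_get?_getD, hget, hi]; rfl
        simp [this]
      rw [List.foldl_cons, hstep, ih (p ++ [c]) d _ (by rw [hded]; exact hget) (by rw [hded]; exact hsize)]
      rw [List.map_cons, hstable, ← hpc]
      simp
    · -- fresh letter: insert with number size+1 = position in extended dedup
      have hcp : c ∉ p := fun hcp => hc ((PySem.List.mem_dedup p c).mpr hcp)
      have hidxnone : PySem.List.index? (PySem.List.dedup p) c = none := by
        rw [PySem.List.index?_eq_none_iff]; exact hc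
      have hcon : d.contains c = false := by rw [hcontains, hidxnone]; rfl
      have hded : PySem.List.dedup (p ++ [c]) = PySem.List.dedup p ++ [c] := by
        rw [dedup_append_singleton]
        unfold PySem.Set.add
        simp [PySem.Set.contains, hcp]
      set d' := d.insert c ((d.size : Int) + 1) with hd'
      have hget' : ∀ x, d'.get? x = Option.map (fun (i : Nat) => ((i : Int) + 1))
          (PySem.List.index? (PySem.List.dedup (p ++ [c])) x) := by
        intro x
        rw [hded, hd', PySem.Dict.get?_insert]
        by_cases hx : x = c
        · subst hx
          rw [if_pos rfl, PySem.List.index?_append_singleton_self _ _ hc]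
          simp [hsize]
        · rw [if_neg hx, hget, index?_append_singleton_of_ne _ _ _ hx]
      have hsize' : d'.size = (PySem.List.dedup (p ++ [c])).length := by
        rw [hded, hd', PySem.Dict.size_insert]
        simp [hcon, hsize]
      have hstable : PySem.List.index? (PySem.List.dedup (p ++ c :: rest)) c =
          some (PySem.List.dedup p).length := by
        rw [hpc]
        obtain ⟨t, ht⟩ := dedup_append_exists rest (p ++ [c])
        rw [ht, hded, PySem.List.index?_append_of_mem _ (by simp),
          PySem.List.index?_append_singleton_self _ _ hc]
      have hstep : burpStep (d, line) c =
          (d', line ++ [PySem.Int.toStr (((PySem.List.dedup p).length : Int) + 1)]) := by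
        unfold burpStep
        simp only [hcon, Bool.false_eq_true, if_false]
        have : d'.getD c 0 = ((PySem.List.dedup p).length : Int) + 1 := by
          rw [PySem.Dict.getD_eq_get?_getD, hget' c, hded,
            PySem.List.index?_append_singleton_self _ _ hc]
          rfl
        rw [← hd', this]
      rw [List.foldl_cons, hstep, ih (p ++ [c]) d' _ hget' hsize']
      rw [List.map_cons, hstable, ← hpc]
      simp

-- bridge: for c in the word, A's first-occurrence rank equals B's distinct-count of the prefix
-- up to c's first occurrence
theorem rank_eq_prefix_distinct (l : List Char) (c : Char) (hc : c ∈ l) :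
    ((PySem.List.index? (PySem.List.dedup l) c).getD 0 : Int) + 1 =
      ((PySem.Set.ofList
        (l.take (((PySem.List.index? l c).getD 0) + 1))).length : Int) := by
  obtain ⟨i, hi⟩ := Option.isSome_iff_exists.mp ((PySem.List.index?_isSome_iff l c).mpr hc)
  obtain ⟨pre, suf, hl, hlen, hpre⟩ := (PySem.List.index?_eq_some_iff l c i).mp hi
  have hcd : c ∉ PySem.List.dedup pre := fun h => hpre ((PySem.List.mem_dedup pre c).mp h)
  have htake : l.take (i + 1) = pre ++ [c] := by
    subst hl; subst hlen
    rw [show pre.length + 1 = pre.length + 1 from rfl]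
    rw [List.take_append]
    simp
  have hded : PySem.List.dedup (pre ++ [c]) = PySem.List.dedup pre ++ [c] := by
    rw [dedup_append_singleton]
    unfold PySem.Set.add
    simp [PySem.Set.contains, hpre]
  have hidxl : PySem.List.index? (PySem.List.dedup l) c = some (PySem.List.dedup pre).length := by
    have hl' : l = (pre ++ [c]) ++ suf := by simp [hl]
    rw [hl']
    obtain ⟨t, ht⟩ := dedup_append_exists suf (pre ++ [c])
    rw [ht, hded, PySem.List.index?_append_of_mem _ (by simp),
      PySem.List.index?_append_singleton_self _ _ hcd]
  rw [hi, hidxl, Option.getD_some, Option.getD_some, htake,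
    ← PySem.List.dedup_eq_ofList, hded]
  simp

-- ===== VERDICT (by name: the statement is the Claim_ definition above) =====
set_option maxHeartbeats 1000000 in
theorem burp_spec : Claim_equal_burp := by
  intro word _
  unfold Spec_burp burp burp_alt
  rw [burp_loop word.toList [] PySem.Dict.empty []
    (by intro x; simp [PySem.List.index?_eq_idxOf?])
    (by rfl)]
  simp only [List.nil_append]
  congr 1
  refine List.map_congr_left (fun c hc => ?_)
  have hslice : PySem.List.slice word.toList none
      (some ((((PySem.List.index? word.toList c).getD 0 : Nat) : Int) + 1)) =
      word.toList.take (((PySem.List.index? word.toList c).getD 0) + 1) := by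
    rw [show (((((PySem.List.index? word.toList c).getD 0 : Nat)) : Int) + 1) =
        ((((PySem.List.index? word.toList c).getD 0) + 1 : Nat) : Int) by push_cast; ring,
      PySem.List.slice_to_natCast]
  rw [hslice, rank_eq_prefix_distinct word.toList c hc]
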